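-- pv_equiv track=rewrite | github.com/stevendejongnl/advent-of-code | 2022/03/day_three.py | group_shared_item
-- ===== SOURCE A (Python) =====
-- def group_shared_item(group):
--     first = [*group[0]]
--     second = [*group[1]]
--     third = [*group[2]]
--
--     shared_item_in_group = ''
--     for item_first in first:
--         for item_second in second:
--             if item_first == item_second and item_first in third:
--                 shared_item_in_group = item_first
--
--     return shared_item_in_group
-- ===== SOURCE B (Python) =====
-- def group_shared_item(group):
--     common = set(group[1]) & set(group[2])
--     for ch in reversed(group[0]):
--         if ch in common:
--             return ch
--     return ''
-- ===== Notes on version B (the rewrite author's own statement) =====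
-- stated objective: alternative
-- what changed: Replaces the nested second×first scans with a set intersection of the second and third strings plus a single reversed scan of the first string with early return (last qualifying char of the first string wins, as in A).
import Mathlib
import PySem

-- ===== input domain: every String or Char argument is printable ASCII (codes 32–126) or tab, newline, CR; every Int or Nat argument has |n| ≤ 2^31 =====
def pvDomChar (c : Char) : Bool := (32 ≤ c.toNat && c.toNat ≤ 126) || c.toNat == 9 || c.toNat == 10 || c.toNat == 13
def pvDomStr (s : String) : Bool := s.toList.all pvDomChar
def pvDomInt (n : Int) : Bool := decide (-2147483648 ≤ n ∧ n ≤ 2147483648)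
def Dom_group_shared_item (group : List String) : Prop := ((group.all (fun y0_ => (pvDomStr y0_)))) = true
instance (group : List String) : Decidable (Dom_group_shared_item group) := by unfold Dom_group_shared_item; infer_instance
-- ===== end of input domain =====

-- B replaces A's nested scans by a set intersection plus one reversed scan with early return.

-- ===== PORT A =====
def group_shared_item (group : List String) : String :=
  match PySem.List.pyGet? group 0, PySem.List.pyGet? group 1, PySem.List.pyGet? group 2 with
  | some g0, some g1, some g2 =>
    let first := g0.toList
    let second := g1.toList
    let third := g2.toList
    first.foldl (fun shared item_first =>
      second.foldl (fun shared item_second =>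
        if item_first == item_second && third.contains item_first
        then String.ofList [item_first] else shared) shared) ""
  | _, _, _ => ""   -- group[i] raises IndexError: excluded by Pre_

-- ===== PORT B =====
-- the 'for ch in reversed(group[0]): if ch in common: return ch' loop of Source B
def pvScanRev (common : PySem.Set Char) : List Char → String
  | [] => ""
  | c :: rest => if PySem.Set.contains common c then String.ofList [c] else pvScanRev common rest

def group_shared_item_alt (group : List String) : String :=
  -- group[i] out of range (IndexError) yields none: excluded by Pre_, result defaults to ""
  (Option.bind (PySem.List.pyGet? group 0) fun g0 =>
   Option.bind (PySem.List.pyGet? group 1) fun g1 =>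
   Option.bind (PySem.List.pyGet? group 2) fun g2 =>
    let common := PySem.Set.inter (PySem.Set.ofList g1.toList) (PySem.Set.ofList g2.toList)
    some (pvScanRev common g0.toList.reverse)).getD ""

-- ===== PRECONDITION & SPEC =====
-- A evaluates group[0], group[1], group[2]: it raises IndexError unless the list has ≥ 3 elements.
def Pre_group_shared_item (group : List String) : Prop := 3 ≤ group.length
instance (group : List String) : Decidable (Pre_group_shared_item group) := by unfold Pre_group_shared_item; infer_instance
def pvWitness_group_shared_item : List String := ["vJrwpWtwJgWr", "hcsFMMfFFhFp", "jqHRNqRjqzjGDLGL"]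

def Spec_group_shared_item (group : List String) (out : String) : Prop := out = group_shared_item_alt group
instance (group : List String) (out : String) : Decidable (Spec_group_shared_item group out) := by unfold Spec_group_shared_item; infer_instance

-- ===== CLAIM (what is proved, stated in full; the proofs are below) =====
def Claim_equal_group_shared_item : Prop := ∀ (group : List String), Dom_group_shared_item group → Pre_group_shared_item group → Spec_group_shared_item group (group_shared_item group)

-- ===== LEMMAS AND PROOFS =====

-- inner loop of A: one pass over `second`, with `c` and the third-membership test fixed
theorem pv_inner (second : List Char) (c : Char) (P : Bool) (acc : String) :
    second.foldl (fun sh c2 => if c == c2 && P then String.ofList [c] else sh) acc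
      = if second.contains c && P then String.ofList [c] else acc := by
  induction second generalizing acc with
  | nil => simp
  | cons d rest ih =>
    simp only [List.foldl_cons, List.contains_cons, ih]
    by_cases hP : P <;> by_cases hd : c == d <;>
      simp [hd, hP]

-- outer loop of A keeps the LAST qualifying char of `first`; B finds the FIRST in reverse
theorem pv_outer (first : List Char) (p : Char → Bool) (acc : String) :
    first.foldl (fun sh c => if p c then String.ofList [c] else sh) acc
      = (match first.reverse.find? p with
         | some c => String.ofList [c]
         | none => acc) := by
  induction first generalizing acc with
  | nil => simp
  | cons c rest ih =>
    simp only [List.foldl_cons, List.reverse_cons, ih, List.find?_append]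
    cases h : rest.reverse.find? p <;> by_cases hc : p c <;> simp [hc]

theorem pv_scanRev (common : PySem.Set Char) (l : List Char) :
    pvScanRev common l
      = (match l.find? (fun c => PySem.Set.contains common c) with
         | some c => String.ofList [c]
         | none => "") := by
  induction l with
  | nil => rfl
  | cons c rest ih =>
    cases hc : PySem.Set.contains common c <;>
      simp only [pvScanRev, List.find?_cons, hc, ih, if_true, if_false, Bool.false_eq_true]

theorem pv_mem_common (g1 g2 : List Char) (c : Char) :
    PySem.Set.contains (PySem.Set.inter (PySem.Set.ofList g1) (PySem.Set.ofList g2)) c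
      = (g1.contains c && g2.contains c) := by
  simp only [PySem.Set.contains, PySem.Set.inter]
  by_cases h1 : c ∈ g1 <;> by_cases h2 : c ∈ g2 <;>
    simp [List.mem_filter, PySem.Set.mem_ofList, h1, h2]

-- ===== VERDICT (by name: the statement is the Claim_ definition above) =====
theorem group_shared_item_spec : Claim_equal_group_shared_item := by
  intro group _ hpre
  unfold Spec_group_shared_item group_shared_item group_shared_item_alt
  unfold Pre_group_shared_item at hpre
  obtain ⟨g0, g1, g2, rest, rfl⟩ : ∃ a b c r, group = a :: b :: c :: r := by
    match group, hpre with
    | a :: b :: c :: r, _ => exact ⟨a, b, c, r, rfl⟩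
  have h1 : PySem.List.pyGet? (g0 :: g1 :: g2 :: rest) 1 = some g1 := by
    have hle : (0:Int) ≤ (rest.length : Int) + 1 := by omega
    simp [PySem.List.pyGet?, PySem.List.pyIdx?, hle]
  have h2 : PySem.List.pyGet? (g0 :: g1 :: g2 :: rest) 2 = some g2 := by
    have hle : (2:Int) ≤ (rest.length : Int) + 1 + 1 := by omega
    simp [PySem.List.pyGet?, PySem.List.pyIdx?, hle]
  rw [PySem.List.pyGet?_zero_cons, h1, h2]
  simp only [Option.bind_some, Option.getD_some]
  have hcommon : (fun c => PySem.Set.contains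
      (PySem.Set.inter (PySem.Set.ofList g1.toList) (PySem.Set.ofList g2.toList)) c)
      = (fun c => g1.toList.contains c && g2.toList.contains c) :=
    funext fun c => pv_mem_common _ _ c
  rw [pv_scanRev, hcommon]
  simp only [pv_inner]
  rw [pv_outer g0.toList (fun c => g1.toList.contains c && g2.toList.contains c)]
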